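-- pv_equiv track=rewrite | github.com/the-omega-institute/automath | theory/2026_golden_ratio_driven_scan_projection_generation_recursive_emergence/scripts/equational_theory/compare_prime_saturation_to_364.py | term_coeff_vector
-- ===== SOURCE A (Python) =====
-- VARS = ("x", "y", "z", "w", "u", "v")
--
-- VAR_INDEX = {name: index for index, name in enumerate(VARS)}
--
-- def term_coeff_vector(tokens: list[str], p: int, a: int, b: int) -> tuple[int, ...]:
--     stack: list[list[int]] = []
--     for token in tokens:
--         if token == "+":
--             right = stack.pop()
--             left = stack.pop()
--             stack.append([(a * left[i] + b * right[i]) % p for i in range(len(VARS))])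
--         else:
--             vector = [0] * len(VARS)
--             vector[VAR_INDEX[token]] = 1
--             stack.append(vector)
--     if len(stack) != 1:
--         raise ValueError(f"bad RPN term {tokens!r}")
--     return tuple(stack[0])
-- ===== SOURCE B (Python) =====
-- VARS = ("x", "y", "z", "w", "u", "v")
--
-- VAR_INDEX = {name: index for index, name in enumerate(VARS)}
--
-- def term_coeff_vector(tokens: list[str], p: int, a: int, b: int) -> tuple[int, ...]:
--     # Phase 1: parse the RPN token stream into an expression tree.
--     stack = []
--     for token in tokens:
--         if token == "+":
--             right = stack.pop()
--             left = stack.pop()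
--             stack.append(("+", left, right))
--         else:
--             stack.append(("var", VARS.index(token)))
--     if len(stack) != 1:
--         raise ValueError(f"bad RPN term {tokens!r}")
--
--     # Phase 2: recursively evaluate the tree into a mod-p coefficient vector.
--     def ev(node):
--         if node[0] == "var":
--             return [1 if i == node[1] else 0 for i in range(len(VARS))]
--         lv = ev(node[1])
--         rv = ev(node[2])
--         return [(a * lv[i] + b * rv[i]) % p for i in range(len(VARS))]
--
--     return tuple(ev(stack[0]))
-- ===== Notes on version B (the rewrite author's own statement) =====
-- stated objective: alternative
-- what changed: B splits A's fused stack evaluation into two phases: it first parses the RPN tokens into an explicit expression tree (stack of nodes instead of stack of vectors) and then evaluates the tree with a recursive evaluator over its structure.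
import Mathlib
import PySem

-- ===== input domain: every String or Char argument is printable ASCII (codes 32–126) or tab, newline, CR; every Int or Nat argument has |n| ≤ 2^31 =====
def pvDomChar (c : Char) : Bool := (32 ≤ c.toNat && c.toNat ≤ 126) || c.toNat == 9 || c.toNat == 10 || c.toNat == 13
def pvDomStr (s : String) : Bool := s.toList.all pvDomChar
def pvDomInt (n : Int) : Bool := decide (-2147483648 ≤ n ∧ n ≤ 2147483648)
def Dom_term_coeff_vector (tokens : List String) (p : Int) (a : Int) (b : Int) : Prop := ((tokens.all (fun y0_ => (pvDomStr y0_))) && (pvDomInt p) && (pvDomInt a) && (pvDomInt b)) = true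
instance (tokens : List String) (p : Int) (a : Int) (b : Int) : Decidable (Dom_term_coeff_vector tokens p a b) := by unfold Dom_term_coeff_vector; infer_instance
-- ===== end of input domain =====

-- B turns A's fused stack-of-vectors evaluation into parse-to-expression-tree then recursive tree evaluation (alternative decomposition, same cost).

-- ===== PORT A =====
-- VAR_INDEX lookup (module-level dict; none = KeyError)
def pvVarIndexA (t : String) : Option Nat :=
  (PySem.Dict.ofList [("x", 0), ("y", 1), ("z", 2), ("w", 3), ("u", 4), ("v", 5)]).get? t

-- the '+' step: [(a*left[i] + b*right[i]) % p for i in range(6)]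
def pvCombine (p a b : Int) (l r : List Int) : List Int :=
  (List.range 6).map (fun i => PySem.Int.mod (a * l.getD i 0 + b * r.getD i 0) p)

-- the loop over tokens; `none` = IndexError (pop underflow) or KeyError (unknown token)
def pvLoopA (p a b : Int) : List String → List (List Int) → Option (List (List Int))
  | [], stack => some stack
  | token :: rest, stack =>
    if token = "+" then
      match stack with
      | right :: left :: st => pvLoopA p a b rest (pvCombine p a b left right :: st)
      | _ => none
    else
      match pvVarIndexA token with
      | some i => pvLoopA p a b rest (((List.replicate 6 (0 : Int)).set i 1) :: stack)
      | none => none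

def term_coeff_vector (tokens : List String) (p : Int) (a : Int) (b : Int) : List Int :=
  match pvLoopA p a b tokens [] with
  | some [v] => v           -- len(stack) == 1: return tuple(stack[0])
  | _ => []                 -- Python raises here (ValueError / earlier exception); excluded by Pre_

-- ===== PORT B =====
-- VARS.index(token) (none = ValueError; same raising inputs as A's KeyError, excluded by Pre_)
def pvVarIndexB (t : String) : Option Nat :=
  PySem.List.index? ["x", "y", "z", "w", "u", "v"] t

inductive PvTree where
  | leaf : Nat → PvTree
  | node : PvTree → PvTree → PvTree
deriving Repr, DecidableEq

-- Phase 1: parse the tokens into an expression tree (stack of nodes); `none` = exception as in A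
def pvParse : List String → List PvTree → Option (List PvTree)
  | [], stack => some stack
  | token :: rest, stack =>
    if token = "+" then
      match stack with
      | [] => none
      | [_] => none
      | right :: left :: st => pvParse rest (PvTree.node left right :: st)
    else
      match pvVarIndexB token with
      | none => none
      | some i => pvParse rest (PvTree.leaf i :: stack)

-- Phase 2: recursive evaluation of the tree into a mod-p coefficient vector
def pvEval (p a b : Int) : PvTree → List Int
  | PvTree.leaf i => (List.range 6).map (fun j => if j = i then 1 else 0)
  | PvTree.node l r =>
    (List.range 6).map (fun i =>
      PySem.Int.mod (a * (pvEval p a b l).getD i 0 + b * (pvEval p a b r).getD i 0) p)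

def term_coeff_vector_alt (tokens : List String) (p : Int) (a : Int) (b : Int) : List Int :=
  match pvParse tokens [] with
  | none => []
  | some stack =>
    match stack with
    | [] => []
    | [t] => pvEval p a b t
    | _ :: _ :: _ => []

-- ===== PRECONDITION & SPEC =====
-- Pre_ excludes exactly the inputs on which Python A raises: an unknown token (KeyError),
-- operand underflow / final stack ≠ 1 (IndexError / ValueError), and p = 0 when a '+' is
-- evaluated (ZeroDivisionError).
def Pre_term_coeff_vector (tokens : List String) (p : Int) (a : Int) (b : Int) : Prop :=
  (∀ t ∈ tokens, t = "+" ∨ t = "x" ∨ t = "y" ∨ t = "z" ∨ t = "w" ∨ t = "u" ∨ t = "v") ∧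
  (∀ k < tokens.length, 2 * ((tokens.take (k + 1)).count "+") + 1 ≤ k + 1) ∧
  tokens.length = 2 * tokens.count "+" + 1 ∧
  (p ≠ 0 ∨ "+" ∉ tokens)
instance (tokens : List String) (p : Int) (a : Int) (b : Int) : Decidable (Pre_term_coeff_vector tokens p a b) := by unfold Pre_term_coeff_vector; infer_instance

def pvWitness_term_coeff_vector : List String × Int × Int × Int := (["x", "y", "+", "z", "+"], 7, 2, 3)

def Spec_term_coeff_vector (tokens : List String) (p : Int) (a : Int) (b : Int) (out : List Int) : Prop := out = term_coeff_vector_alt tokens p a b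
instance (tokens : List String) (p : Int) (a : Int) (b : Int) (out : List Int) : Decidable (Spec_term_coeff_vector tokens p a b out) := by unfold Spec_term_coeff_vector; infer_instance

-- ===== CLAIM (what is proved, stated in full; the proofs are below) =====
def Claim_equal_term_coeff_vector : Prop := ∀ (tokens : List String) (p : Int) (a : Int) (b : Int), Dom_term_coeff_vector tokens p a b → Pre_term_coeff_vector tokens p a b → Spec_term_coeff_vector tokens p a b (term_coeff_vector tokens p a b)

-- ===== LEMMAS AND PROOFS =====
-- the dict lookup of A and the tuple-index lookup of B agree
theorem pvVarIndex_agree (t : String) : pvVarIndexA t = pvVarIndexB t := by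
  by_cases h1 : t = "x"; · subst h1; decide
  by_cases h2 : t = "y"; · subst h2; decide
  by_cases h3 : t = "z"; · subst h3; decide
  by_cases h4 : t = "w"; · subst h4; decide
  by_cases h5 : t = "u"; · subst h5; decide
  by_cases h6 : t = "v"; · subst h6; decide
  have hB : pvVarIndexB t = none := by
    rw [pvVarIndexB, PySem.List.index?_eq_none_iff]
    simp [h1, h2, h3, h4, h5, h6]
  have hitems : (PySem.Dict.empty.update [("x", (0 : Nat)), ("y", 1), ("z", 2), ("w", 3), ("u", 4), ("v", 5)]).items = [("x", 0), ("y", 1), ("z", 2), ("w", 3), ("u", 4), ("v", 5)] := by decide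
  have hfind : List.find? (fun q => q.1 == t) [("x", (0 : Nat)), ("y", 1), ("z", 2), ("w", 3), ("u", 4), ("v", 5)] = none := by
    rw [List.find?_eq_none]
    intro x hx
    simp only [List.mem_cons, List.not_mem_nil, or_false] at hx
    rcases hx with rfl | rfl | rfl | rfl | rfl | rfl <;>
      (simp only [beq_iff_eq]; rintro rfl) <;> simp_all
  simp [pvVarIndexA, PySem.Dict.get?, PySem.Dict.ofList, hitems, hfind, hB]

-- Run correspondence: A's stack of vectors is the image, under pvEval, of B's stack of trees.
theorem pvLoopA_eq_parse (p a b : Int) (ts : List String) (st : List PvTree) :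
    pvLoopA p a b ts (st.map (pvEval p a b)) = (pvParse ts st).map (List.map (pvEval p a b)) := by
  induction ts generalizing st with
  | nil => simp [pvLoopA, pvParse]
  | cons token rest ih =>
    by_cases h : token = "+"
    · subst h
      match st with
      | [] => simp [pvLoopA, pvParse]
      | [t] => simp [pvLoopA, pvParse]
      | r :: l :: st' =>
        have : pvCombine p a b (pvEval p a b l) (pvEval p a b r) = pvEval p a b (PvTree.node l r) := by
          simp [pvCombine, pvEval]
        simp only [pvLoopA, pvParse, List.map, this]
        exact ih (PvTree.node l r :: st')
    · have hAB : pvVarIndexA token = pvVarIndexB token := pvVarIndex_agree token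
      cases hv : pvVarIndexB token with
      | none => simp [pvLoopA, pvParse, h, hAB, hv]
      | some i =>
        have hleaf : (List.replicate 6 (0 : Int)).set i 1 = pvEval p a b (PvTree.leaf i) := by
          -- pvVarIndex only returns indices 0..5
          have : i < 6 := by
            obtain ⟨hk, -, -⟩ := PySem.List.getElem_of_index?_eq_some hv
            simpa using hk
          interval_cases i <;> simp [pvEval, List.range_succ]
        simp only [pvLoopA, pvParse, if_neg h, hAB, hv, hleaf]
        exact ih (PvTree.leaf i :: st)

-- A = B on every input (outside Pre_ both ports return the same dummy []).
theorem pv_unconditional (tokens : List String) (p a b : Int) :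
    term_coeff_vector tokens p a b = term_coeff_vector_alt tokens p a b := by
  unfold term_coeff_vector term_coeff_vector_alt
  have h := pvLoopA_eq_parse p a b tokens []
  simp only [List.map] at h
  rw [h]
  cases hp : pvParse tokens [] with
  | none => simp
  | some st =>
    match st with
    | [] => simp
    | [t] => simp
    | t :: t' :: r => simp

-- ===== VERDICT (by name: the statement is the Claim_ definition above) =====
theorem term_coeff_vector_spec : Claim_equal_term_coeff_vector := by
  intro tokens p a b _ _
  unfold Spec_term_coeff_vector
  exact pv_unconditional tokens p a b
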